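-- pv_equiv track=rewrite | github.com/ownvoy/DSC3037-Fall-2022 | timetabling.py | icam_remove
-- ===== SOURCE A (Python) =====
-- def icam_remove(possible):
--     remove_idx = []
--     for idx, course in enumerate(possible):
--         if "i-Campus" in course["campus"]:
--             if idx not in remove_idx:
--                 remove_idx.append(idx)
--     remove_idx_reverse = sorted(remove_idx, reverse=True)
--     for idx in remove_idx_reverse:
--         del possible[idx]
--     return possible
-- ===== SOURCE B (Python) =====
-- def icam_remove(possible):
--     kept = [course for course in possible if "i-Campus" not in course["campus"]]
--     possible[:] = kept
--     return possible
-- ===== Notes on version B (the rewrite author's own statement) =====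
-- stated objective: simpler
-- what changed: Replaces the two-phase collect-indices / sort-descending / delete-by-position strategy with a single filtering pass over values, written back in place with slice assignment so the caller's list object is still mutated and returned.
import Mathlib
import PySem

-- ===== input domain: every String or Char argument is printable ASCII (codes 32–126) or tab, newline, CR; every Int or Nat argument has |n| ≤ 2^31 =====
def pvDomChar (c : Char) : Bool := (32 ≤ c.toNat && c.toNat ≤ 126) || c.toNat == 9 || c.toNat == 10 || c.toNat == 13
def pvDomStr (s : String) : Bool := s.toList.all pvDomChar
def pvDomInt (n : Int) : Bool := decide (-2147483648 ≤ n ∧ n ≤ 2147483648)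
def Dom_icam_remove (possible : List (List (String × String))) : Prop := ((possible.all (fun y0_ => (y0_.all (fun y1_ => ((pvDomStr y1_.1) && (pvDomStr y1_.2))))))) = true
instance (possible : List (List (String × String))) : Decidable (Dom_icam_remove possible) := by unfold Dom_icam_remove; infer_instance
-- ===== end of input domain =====

-- B filters in one pass instead of A's collect-indices / sort-descending / delete-by-position;
-- A mutates its argument in place and B mimics that with slice assignment — the equivalence proved
-- here is about the RETURN value.

-- ===== PORT A =====
-- course["campus"]: KeyError when the key is absent is excluded by Pre_; the port totalises with "".
def icamCampus (course : List (String × String)) : String :=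
  PySem.Dict.getD ⟨course⟩ "campus" ""

def icam_remove (possible : List (List (String × String))) : List (List (String × String)) :=
  let remove_idx : List Int :=
    (PySem.List.enumerate possible).foldl
      (fun acc p =>
        if PySem.Str.isIn "i-Campus" (icamCampus p.2) then
          (if acc.contains p.1 then acc else acc ++ [p.1])
        else acc) []
  let remove_idx_reverse := PySem.List.sorted remove_idx (fun x => x) true
  remove_idx_reverse.foldl
    (fun cur idx => ((PySem.List.pop? cur idx).map Prod.snd).getD cur) possible

-- ===== PORT B =====
def icam_remove_alt (possible : List (List (String × String))) : List (List (String × String)) :=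
  possible.filter (fun course => !(PySem.Str.isIn "i-Campus" (icamCampus course)))

-- ===== PRECONDITION & SPEC =====
-- Pre_ excludes exactly the inputs on which Python A raises KeyError (a course without a "campus" key).
def Pre_icam_remove (possible : List (List (String × String))) : Prop :=
  (possible.all (fun course => PySem.Dict.contains ⟨course⟩ "campus")) = true
instance (possible : List (List (String × String))) : Decidable (Pre_icam_remove possible) := by unfold Pre_icam_remove; infer_instance
def pvWitness_icam_remove : (List (List (String × String))) :=
  [[("campus", "i-Campus Online")], [("campus", "Suwon")]]

def Spec_icam_remove (possible : List (List (String × String))) (out : List (List (String × String))) : Prop := out = icam_remove_alt possible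
instance (possible : List (List (String × String))) (out : List (List (String × String))) : Decidable (Spec_icam_remove possible out) := by unfold Spec_icam_remove; infer_instance

-- ===== CLAIM (what is proved, stated in full; the proofs are below) =====
def Claim_equal_icam_remove : Prop := ∀ (possible : List (List (String × String))), Dom_icam_remove possible → Pre_icam_remove possible → Spec_icam_remove possible (icam_remove possible)

-- ===== LEMMAS AND PROOFS =====

-- the predicate "this course is to be removed"
def icamPred (course : List (String × String)) : Bool :=
  PySem.Str.isIn "i-Campus" (icamCampus course)

-- the ascending list of indices (starting at s) of courses satisfying icamPred
def icamJ : List (List (String × String)) → Int → List Int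
  | [], _ => []
  | x :: xs, s => (if icamPred x then [s] else []) ++ icamJ xs (s + 1)

lemma icamJ_mem : ∀ (xs : List (List (String × String))) (s i : Int),
    i ∈ icamJ xs s → s ≤ i ∧ i < s + xs.length := by
  intro xs
  induction xs with
  | nil => intro s i h; simp [icamJ] at h
  | cons x xs ih =>
    intro s i h
    simp only [icamJ, List.mem_append] at h
    rcases h with h | h
    · split at h <;> simp_all
    · have := ih (s + 1) i h
      simp only [List.length_cons]
      omega

lemma icamJ_pairwise : ∀ (xs : List (List (String × String))) (s : Int),
    (icamJ xs s).Pairwise (· < ·) := by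
  intro xs
  induction xs with
  | nil => intro s; simp [icamJ]
  | cons x xs ih =>
    intro s
    simp only [icamJ]
    rw [List.pairwise_append]
    refine ⟨?_, ih (s + 1), ?_⟩
    · split <;> simp
    · intro a ha b hb
      have hb' := icamJ_mem xs (s + 1) b hb
      split at ha <;> simp_all

-- A's first loop accumulates exactly icamJ
lemma icam_loopA : ∀ (xs : List (List (String × String))) (s : Int) (acc : List Int),
    (∀ i ∈ acc, i < s) →
    (PySem.List.enumerate xs s).foldl
      (fun acc p =>
        if PySem.Str.isIn "i-Campus" (icamCampus p.2) then
          (if acc.contains p.1 then acc else acc ++ [p.1])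
        else acc) acc = acc ++ icamJ xs s := by
  intro xs
  induction xs with
  | nil => intro s acc _; simp [PySem.List.enumerate_nil, icamJ]
  | cons x xs ih =>
    intro s acc hacc
    rw [PySem.List.enumerate_cons]
    simp only [List.foldl_cons, icamJ]
    by_cases hp : icamPred x
    · have hc : acc.contains s = false := by
        simp only [List.contains_eq_mem, decide_eq_false_iff_not]
        intro hmem; exact absurd rfl (ne_of_lt (hacc s hmem))
      rw [show (PySem.Str.isIn "i-Campus" (icamCampus x)) = true from hp]
      simp only [if_true, hc, Bool.false_eq_true, if_false]
      rw [ih (s + 1) (acc ++ [s]) (by intro i hi; rcases List.mem_append.1 hi with h | h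
                                      · exact lt_trans (hacc i h) (by omega)
                                      · simp at h; omega)]
      simp [hp]
    · rw [show (PySem.Str.isIn "i-Campus" (icamCampus x)) = false from by
        simpa [icamPred] using hp]
      simp only [Bool.false_eq_true, if_false]
      rw [ih (s + 1) acc (fun i hi => lt_trans (hacc i hi) (by omega))]
      simp [hp]

-- the deletion fold
def icamDel (cur : List (List (String × String))) (l : List Int) : List (List (String × String)) :=
  l.foldl (fun cur idx => ((PySem.List.pop? cur idx).map Prod.snd).getD cur) cur

lemma icamDel_append (cur : List (List (String × String))) (l₁ l₂ : List Int) :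
    icamDel cur (l₁ ++ l₂) = icamDel (icamDel cur l₁) l₂ := by
  simp [icamDel, List.foldl_append]

-- popping index i+1 from x :: xs, for a valid index i of xs
lemma icam_pop_shift (x : List (String × String)) (xs : List (List (String × String)))
    (i : Int) (h0 : 0 ≤ i) (h1 : i < xs.length) :
    ((PySem.List.pop? (x :: xs) (i + 1)).map Prod.snd).getD (x :: xs)
      = x :: ((PySem.List.pop? xs i).map Prod.snd).getD xs := by
  obtain ⟨n, rfl⟩ := Int.eq_ofNat_of_zero_le h0
  have hn : n < xs.length := by exact_mod_cast h1
  have h2 : (PySem.List.pop? xs (n : Int)) = some (xs[n], xs.eraseIdx n) :=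
    PySem.List.pop?_natCast xs n hn
  have h3 : ((n : Int) + 1) = ((n + 1 : Nat) : Int) := by push_cast; ring
  have hn1 : n + 1 < (x :: xs).length := by simp; omega
  have h4 : (PySem.List.pop? (x :: xs) ((n + 1 : Nat) : Int))
      = some ((x :: xs)[n + 1], (x :: xs).eraseIdx (n + 1)) :=
    PySem.List.pop?_natCast (x :: xs) (n + 1) hn1
  rw [h3, h4, h2]
  simp [List.eraseIdx_cons_succ]

-- deleting shifted indices leaves the head alone
lemma icamDel_shift : ∀ (l : List Int) (x : List (String × String)) (xs : List (List (String × String))),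
    (∀ i ∈ l, 0 ≤ i ∧ i < xs.length) → l.Pairwise (· > ·) →
    icamDel (x :: xs) (l.map (· + 1)) = x :: icamDel xs l := by
  intro l
  induction l with
  | nil => intro x xs _ _; simp [icamDel]
  | cons i l ih =>
    intro x xs hb hp
    obtain ⟨hi0, hi1⟩ := hb i (by simp)
    obtain ⟨n, rfl⟩ := Int.eq_ofNat_of_zero_le hi0
    have hn : n < xs.length := by exact_mod_cast hi1
    simp only [List.map_cons, icamDel, List.foldl_cons]
    rw [icam_pop_shift x xs (n : Int) hi0 hi1]
    have hsome : (PySem.List.pop? xs (n : Int)) = some (xs[n], xs.eraseIdx n) :=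
      PySem.List.pop?_natCast xs n hn
    rw [show (((PySem.List.pop? xs (n : Int)).map Prod.snd).getD xs) = xs.eraseIdx n from by
      rw [hsome]; rfl]
    have hlen : (xs.eraseIdx n).length = xs.length - 1 :=
      List.length_eraseIdx_of_lt hn
    have hp' := List.pairwise_cons.1 hp
    have := ih x (xs.eraseIdx n)
      (by intro j hj
          obtain ⟨hj0, hj1⟩ := hb j (by simp [hj])
          have : j < (n : Int) := hp'.1 j hj
          refine ⟨hj0, ?_⟩
          rw [hlen]; omega)
      hp'.2
    simpa [icamDel] using this

-- the main deletion characterisation: deleting the descending index list filters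
lemma icamDel_filter : ∀ (xs : List (List (String × String))),
    icamDel xs (icamJ xs 0).reverse = xs.filter (fun c => !(icamPred c)) := by
  intro xs
  induction xs with
  | nil => simp [icamDel, icamJ]
  | cons x xs ih =>
    have hshift : icamJ xs 1 = (icamJ xs 0).map (· + 1) := by
      clear ih
      suffices h : ∀ (ys : List (List (String × String))) (s : Int),
          icamJ ys (s + 1) = (icamJ ys s).map (· + 1) by simpa using h xs 0
      intro ys
      induction ys with
      | nil => intro s; simp [icamJ]
      | cons y ys ihy =>
        intro s
        simp only [icamJ, List.map_append]
        rw [ihy (s + 1)]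
        congr 1
        split <;> simp
    have hJ : icamJ (x :: xs) 0 = (if icamPred x then [(0 : Int)] else []) ++ (icamJ xs 0).map (· + 1) := by
      simp only [icamJ, zero_add, hshift]
    rw [hJ, List.reverse_append, List.map_reverse.symm, icamDel_append]
    have hb : ∀ i ∈ (icamJ xs 0).reverse, 0 ≤ i ∧ i < xs.length := by
      intro i hi
      have := icamJ_mem xs 0 i (List.mem_reverse.1 hi)
      omega
    have hpw : (icamJ xs 0).reverse.Pairwise (· > ·) := by
      rw [List.pairwise_reverse]; exact icamJ_pairwise xs 0
    rw [icamDel_shift (icamJ xs 0).reverse x xs hb hpw, ih]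
    by_cases hp : icamPred x
    · simp [hp, icamDel, PySem.List.pop?_zero_cons]
    · simp [hp, icamDel]

-- ===== VERDICT (by name: the statement is the Claim_ definition above) =====
theorem icam_remove_spec : Claim_equal_icam_remove := by
  intro possible _ _
  unfold Spec_icam_remove icam_remove icam_remove_alt
  rw [icam_loopA possible 0 [] (by simp)]
  simp only [List.nil_append]
  rw [PySem.List.sorted_rev_eq_of_perm_of_pairwise_gt (icamJ possible 0) (icamJ possible 0).reverse
    (fun x => x) (List.reverse_perm _)
    (by rw [List.pairwise_reverse]; exact icamJ_pairwise possible 0)]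
  have := icamDel_filter possible
  simp only [icamDel] at this
  rw [this]
  simp [icamPred]
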